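-- pv_equiv track=rewrite | github.com/bryonymoody/PolyChron | PolyChron/gui.py | del_empty_phases
-- ===== SOURCE A (Python) =====
-- def del_empty_phases(phi_ref, del_phase, phasedict):
--     """checks for any phase rels that need changing due to missing dates"""
--     del_phase = [i for i in phi_ref if i in del_phase]
--     del_phase_dict_1 = {}
--     for j in del_phase:
--         del_phase_dict = {}
--         rels_list = [i for i in phasedict.keys() if j in i]
--         for rels in rels_list:
--             if rels[0] == j:
--                 del_phase_dict["lower"] = rels[1]
--             if rels[1] == j:
--                 del_phase_dict["upper"] = rels[0]
--         del_phase_dict_1[j] = del_phase_dict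
--     if phi_ref[-1] in del_phase_dict_1.keys():
--         del_phase_dict_1[phi_ref[-1]]["upper"] = "end"
--     if phi_ref[0] in del_phase_dict_1.keys():
--         del_phase_dict_1[phi_ref[0]]["lower"] = "start"
--     # We then have to run the loop again in case any phases are next to eachother, this checks that
--     for j in del_phase:
--         rels_list = [i for i in phasedict.keys() if j in i]
--         for rels in rels_list:
--             if rels[0] == j:
--                 if rels[1] in del_phase:
--                     del_phase_dict_1[j]["lower"] = del_phase_dict_1[rels[1]]["lower"]
--     del_phase.reverse()
--     for k in del_phase:
--         rels_list = [i for i in phasedict.keys() if k in i]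
--         for rels in rels_list:
--             if rels[1] == k:
--                 if rels[0] in del_phase:
--                     del_phase_dict_1[k]["upper"] = del_phase_dict_1[rels[0]]["upper"]
--     new_phase_rels = [
--         [del_phase_dict_1[l]["upper"], del_phase_dict_1[l]["lower"]]
--         for l in del_phase_dict_1.keys()
--         if del_phase_dict_1[l]["upper"] != "end"
--         if del_phase_dict_1[l]["lower"] != "start"
--     ]
--     return new_phase_rels
-- ===== SOURCE B (Python) =====
-- def del_empty_phases(phi_ref, del_phase, phasedict):
--     """Recompute phase relations after deleting empty phases: one pass over the
--     relation keys builds lower/upper and adjacency indexes, then one lookup per phase."""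
--     keys = list(phasedict.keys())
--     del_set = set(del_phase)
--     dels = [p for p in phi_ref if p in del_set]
--     member = set(dels)
--     lower, upper, succ, pred = {}, {}, {}, {}
--     for a, b in keys:
--         if a in member:
--             lower[a] = b
--         if b in member:
--             upper[b] = a
--         succ.setdefault(a, []).append(b)
--         pred.setdefault(b, []).append(a)
--     if phi_ref[-1] in member:
--         upper[phi_ref[-1]] = "end"
--     if phi_ref[0] in member:
--         lower[phi_ref[0]] = "start"
--     for j in dels:
--         for b in succ.get(j, ()):
--             if b in member:
--                 lower[j] = lower[b]
--     for k in reversed(dels):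
--         for a in pred.get(k, ()):
--             if a in member:
--                 upper[k] = upper[a]
--     return [[upper[l], lower[l]]
--             for l in dict.fromkeys(dels)
--             if upper[l] != "end" if lower[l] != "start"]
-- ===== Notes on version B (the rewrite author's own statement) =====
-- stated objective: faster
-- what changed: A rescans the whole relation-key list once per deleted phase in each of its three passes; B scans the keys once, building the lower/upper tables and successor/predecessor adjacency indexes in a single pass, so the chaining passes do one index lookup per phase instead of a full key scan.
import Mathlib
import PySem

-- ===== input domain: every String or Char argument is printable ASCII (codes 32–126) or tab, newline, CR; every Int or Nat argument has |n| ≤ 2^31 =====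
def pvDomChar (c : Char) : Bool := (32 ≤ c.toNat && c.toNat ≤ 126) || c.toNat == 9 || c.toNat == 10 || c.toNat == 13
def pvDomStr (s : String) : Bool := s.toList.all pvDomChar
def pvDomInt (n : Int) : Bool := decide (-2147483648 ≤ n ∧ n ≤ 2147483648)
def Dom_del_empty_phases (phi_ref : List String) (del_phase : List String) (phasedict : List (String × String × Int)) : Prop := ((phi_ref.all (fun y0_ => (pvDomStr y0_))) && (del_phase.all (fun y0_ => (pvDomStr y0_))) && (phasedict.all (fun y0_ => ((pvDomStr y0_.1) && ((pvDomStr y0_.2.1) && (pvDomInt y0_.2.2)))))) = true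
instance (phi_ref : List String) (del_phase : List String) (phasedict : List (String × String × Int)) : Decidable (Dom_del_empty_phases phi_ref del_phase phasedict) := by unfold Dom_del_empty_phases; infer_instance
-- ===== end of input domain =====

-- B replaces A's per-phase rescans of the relation keys by one pass over the keys
-- that builds lower/upper tables and successor/predecessor adjacency indexes, then one lookup per phase.

-- ===== PORT A =====
-- dict keys of phasedict: first occurrence of each (lower, upper) pair, in order
def pvKeysOf (phasedict : List (String × String × Int)) : List (String × String) :=
  PySem.Set.ofList (phasedict.map (fun t => (t.1, t.2.1)))

-- inner loop of A's first pass: the per-phase {"lower": …, "upper": …} dict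
def pvAInner (keys : List (String × String)) (j : String) : PySem.Dict String String :=
  (keys.filter (fun r => r.1 == j || r.2 == j)).foldl (fun dj r =>
    let dj1 := if r.1 == j then dj.insert "lower" r.2 else dj
    if r.2 == j then dj1.insert "upper" r.1 else dj1) PySem.Dict.empty

def pvAPhase1 (keys : List (String × String)) (dels : List String) :
    PySem.Dict String (PySem.Dict String String) :=
  dels.foldl (fun d1 j => d1.insert j (pvAInner keys j)) PySem.Dict.empty

def pvALoop2 (keys : List (String × String)) (dels : List String)
    (d1 : PySem.Dict String (PySem.Dict String String)) :
    PySem.Dict String (PySem.Dict String String) :=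
  dels.foldl (fun d1 j =>
    (keys.filter (fun r => r.1 == j || r.2 == j)).foldl (fun d1 r =>
      if r.1 == j then
        if dels.contains r.2 then
          d1.modify j PySem.Dict.empty
            (fun d => d.insert "lower" ((d1.getD r.2 PySem.Dict.empty).getD "lower" ""))
        else d1
      else d1) d1) d1

def pvALoop3 (keys : List (String × String)) (delsR : List String)
    (d1 : PySem.Dict String (PySem.Dict String String)) :
    PySem.Dict String (PySem.Dict String String) :=
  delsR.foldl (fun d1 k =>
    (keys.filter (fun r => r.1 == k || r.2 == k)).foldl (fun d1 r =>
      if r.2 == k then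
        if delsR.contains r.1 then
          d1.modify k PySem.Dict.empty
            (fun d => d.insert "upper" ((d1.getD r.1 PySem.Dict.empty).getD "upper" ""))
        else d1
      else d1) d1) d1

def del_empty_phases (phi_ref : List String) (del_phase : List String) (phasedict : List (String × String × Int)) : List (List String) :=
  let keys := pvKeysOf phasedict
  let dels := phi_ref.filter (fun i => del_phase.contains i)
  let d1 := pvAPhase1 keys dels
  let lastp := (PySem.List.pyGet? phi_ref (-1)).getD ""
  let firstp := (PySem.List.pyGet? phi_ref 0).getD ""
  let d1 := if d1.contains lastp then d1.modify lastp PySem.Dict.empty (fun d => d.insert "upper" "end") else d1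
  let d1 := if d1.contains firstp then d1.modify firstp PySem.Dict.empty (fun d => d.insert "lower" "start") else d1
  let d1 := pvALoop2 keys dels d1
  let delsR := dels.reverse
  let d1 := pvALoop3 keys delsR d1
  (d1.keys.filter (fun l =>
      ((d1.getD l PySem.Dict.empty).getD "upper" "" != "end") &&
      ((d1.getD l PySem.Dict.empty).getD "lower" "" != "start"))).map
    (fun l => [(d1.getD l PySem.Dict.empty).getD "upper" "",
               (d1.getD l PySem.Dict.empty).getD "lower" ""])

-- ===== PORT B =====
-- one pass over the keys: lower/upper tables and successor/predecessor adjacency indexes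
def pvBPass (member : PySem.Set String) (keys : List (String × String)) :
    PySem.Dict String String × PySem.Dict String String ×
    PySem.Dict String (List String) × PySem.Dict String (List String) :=
  keys.foldl (fun st r =>
      (if PySem.Set.contains member r.1 then st.1.insert r.1 r.2 else st.1,
       if PySem.Set.contains member r.2 then st.2.1.insert r.2 r.1 else st.2.1,
       st.2.2.1.modify r.1 [] (fun l => l ++ [r.2]),
       st.2.2.2.modify r.2 [] (fun l => l ++ [r.1])))
    (PySem.Dict.empty, PySem.Dict.empty, PySem.Dict.empty, PySem.Dict.empty)

def pvBChainLow (member : PySem.Set String) (succ : PySem.Dict String (List String))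
    (dels : List String) (lower : PySem.Dict String String) : PySem.Dict String String :=
  dels.foldl (fun lower j =>
    (succ.getD j []).foldl (fun lower b =>
      if PySem.Set.contains member b then lower.insert j (lower.getD b "") else lower) lower) lower

def pvBChainUp (member : PySem.Set String) (pred : PySem.Dict String (List String))
    (delsR : List String) (upper : PySem.Dict String String) : PySem.Dict String String :=
  delsR.foldl (fun upper k =>
    (pred.getD k []).foldl (fun upper a =>
      if PySem.Set.contains member a then upper.insert k (upper.getD a "") else upper) upper) upper

def del_empty_phases_alt (phi_ref : List String) (del_phase : List String) (phasedict : List (String × String × Int)) : List (List String) :=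
  let keys := pvKeysOf phasedict
  let del_set := PySem.Set.ofList del_phase
  let dels := phi_ref.filter (fun p => PySem.Set.contains del_set p)
  let member := PySem.Set.ofList dels
  let st := pvBPass member keys
  let lower := st.1
  let upper := st.2.1
  let succ := st.2.2.1
  let pred := st.2.2.2
  let lastp := (PySem.List.pyGet? phi_ref (-1)).getD ""
  let firstp := (PySem.List.pyGet? phi_ref 0).getD ""
  let upper := if PySem.Set.contains member lastp then upper.insert lastp "end" else upper
  let lower := if PySem.Set.contains member firstp then lower.insert firstp "start" else lower
  let lower := pvBChainLow member succ dels lower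
  let upper := pvBChainUp member pred dels.reverse upper
  let order := PySem.Set.ofList dels
  (order.filter (fun l => (upper.getD l "" != "end") && (lower.getD l "" != "start"))).map
    (fun l => [upper.getD l "", lower.getD l ""])

-- ===== PRECONDITION & SPEC =====
-- Pre_ excludes exactly the inputs on which A raises: an empty phi_ref (IndexError on
-- phi_ref[-1]), and inputs where some deleted phase lacks the upper/lower neighbour whose
-- "upper"/"lower" entry A goes on to read (KeyError).
def Pre_del_empty_phases (phi_ref : List String) (del_phase : List String) (phasedict : List (String × String × Int)) : Prop :=
  phi_ref ≠ [] ∧ ∀ j, j ∈ phi_ref → j ∈ del_phase →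
    ((∃ r ∈ phasedict, r.2.1 = j) ∨ phi_ref.getLast? = some j) ∧
    ((∃ r ∈ phasedict, r.1 = j) ∨ phi_ref.head? = some j ∨
      (phi_ref.getLast? = some j ∧
        ¬ ∃ r ∈ phasedict, r.2.1 = j ∧ r.1 ∈ phi_ref ∧ r.1 ∈ del_phase))
instance (phi_ref : List String) (del_phase : List String) (phasedict : List (String × String × Int)) : Decidable (Pre_del_empty_phases phi_ref del_phase phasedict) := by unfold Pre_del_empty_phases; infer_instance

def pvWitness_del_empty_phases : List String × List String × (List (String × String × Int)) :=
  (["a", "b", "c"], ["b"], [("a", "b", 0), ("b", "c", 1)])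

def Spec_del_empty_phases (phi_ref : List String) (del_phase : List String) (phasedict : List (String × String × Int)) (out : List (List String)) : Prop := out = del_empty_phases_alt phi_ref del_phase phasedict
instance (phi_ref : List String) (del_phase : List String) (phasedict : List (String × String × Int)) (out : List (List String)) : Decidable (Spec_del_empty_phases phi_ref del_phase phasedict out) := by unfold Spec_del_empty_phases; infer_instance

-- ===== CLAIM (what is proved, stated in full; the proofs are below) =====
def Claim_equal_del_empty_phases : Prop := ∀ (phi_ref : List String) (del_phase : List String) (phasedict : List (String × String × Int)), Dom_del_empty_phases phi_ref del_phase phasedict → Pre_del_empty_phases phi_ref del_phase phasedict → Spec_del_empty_phases phi_ref del_phase phasedict (del_empty_phases phi_ref del_phase phasedict)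

-- ===== LEMMAS AND PROOFS =====
-- Bool membership bridges
lemma pvContains_ofList (l : List String) (x : String) :
    PySem.Set.contains (PySem.Set.ofList l) x = l.contains x := by
  rw [Bool.eq_iff_iff]
  simp [PySem.Set.mem_ofList]

def pvRel (D : List String) (d1 : PySem.Dict String (PySem.Dict String String))
    (low up : PySem.Dict String String) : Prop :=
  d1.keys = PySem.Set.ofList D ∧
  ∀ j ∈ D, (d1.getD j PySem.Dict.empty).get? "lower" = low.get? j ∧
           (d1.getD j PySem.Dict.empty).get? "upper" = up.get? j

lemma pvKeys_modify_mem (d1 : PySem.Dict String (PySem.Dict String String)) (j : String)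
    (hj : j ∈ d1.keys) (f : PySem.Dict String String → PySem.Dict String String) :
    (d1.modify j PySem.Dict.empty f).keys = d1.keys := by
  rw [PySem.Dict.keys_modify, PySem.Dict.keys_insert_of_contains]
  exact (PySem.Dict.contains_iff_mem_keys _ _).2 hj

lemma pvRel_update_low (D : List String) (d1 : PySem.Dict String (PySem.Dict String String))
    (low up : PySem.Dict String String) (j : String) (v : String) (hj : j ∈ D)
    (h : pvRel D d1 low up) :
    pvRel D (d1.modify j PySem.Dict.empty (fun d => d.insert "lower" v)) (low.insert j v) up := by
  obtain ⟨hk, hrel⟩ := h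
  refine ⟨by rw [pvKeys_modify_mem _ _ (by rw [hk]; exact (PySem.Set.mem_ofList D j).2 hj), hk], ?_⟩
  intro j' hj'
  by_cases hjj : j' = j
  · subst hjj
    rw [PySem.Dict.getD_modify_self]
    exact ⟨by rw [PySem.Dict.get?_insert_self, PySem.Dict.get?_insert_self],
      by rw [PySem.Dict.get?_insert_of_ne _ _ (show ("upper" : String) ≠ "lower" by decide)]
         exact (hrel j' hj').2⟩
  · rw [PySem.Dict.getD_modify_of_ne _ _ _ hjj,
      PySem.Dict.get?_insert_of_ne _ _ hjj]
    exact hrel j' hj'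

lemma pvRel_update_up (D : List String) (d1 : PySem.Dict String (PySem.Dict String String))
    (low up : PySem.Dict String String) (j : String) (v : String) (hj : j ∈ D)
    (h : pvRel D d1 low up) :
    pvRel D (d1.modify j PySem.Dict.empty (fun d => d.insert "upper" v)) low (up.insert j v) := by
  obtain ⟨hk, hrel⟩ := h
  refine ⟨by rw [pvKeys_modify_mem _ _ (by rw [hk]; exact (PySem.Set.mem_ofList D j).2 hj), hk], ?_⟩
  intro j' hj'
  by_cases hjj : j' = j
  · subst hjj
    rw [PySem.Dict.getD_modify_self]
    exact ⟨by rw [PySem.Dict.get?_insert_of_ne _ _ (show ("lower" : String) ≠ "upper" by decide)]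
              exact (hrel j' hj').1,
      by rw [PySem.Dict.get?_insert_self, PySem.Dict.get?_insert_self]⟩
  · rw [PySem.Dict.getD_modify_of_ne _ _ _ hjj,
      PySem.Dict.get?_insert_of_ne _ _ hjj]
    exact hrel j' hj'

-- A's inner per-phase dict, characterised as last-match folds
lemma pvAInner_low_aux (j : String) (keys : List (String × String)) :
    ∀ dj : PySem.Dict String String,
    (keys.foldl (fun dj r =>
        if r.1 == j || r.2 == j then
          (let dj1 := if r.1 == j then dj.insert "lower" r.2 else dj;
           if r.2 == j then dj1.insert "upper" r.1 else dj1)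
        else dj) dj).get? "lower"
      = keys.foldl (fun o r => if r.1 == j then some r.2 else o) (dj.get? "lower") := by
  induction keys with
  | nil => intro dj; rfl
  | cons r keys ih =>
    intro dj
    simp only [List.foldl_cons]
    rw [ih]
    congr 1
    by_cases h1 : r.1 = j <;> by_cases h2 : r.2 = j <;>
      simp [h1, h2, PySem.Dict.get?_insert_self,
        PySem.Dict.get?_insert_of_ne _ _ (show ("lower" : String) ≠ "upper" by decide)]

lemma pvAInner_up_aux (j : String) (keys : List (String × String)) :
    ∀ dj : PySem.Dict String String,
    (keys.foldl (fun dj r =>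
        if r.1 == j || r.2 == j then
          (let dj1 := if r.1 == j then dj.insert "lower" r.2 else dj;
           if r.2 == j then dj1.insert "upper" r.1 else dj1)
        else dj) dj).get? "upper"
      = keys.foldl (fun o r => if r.2 == j then some r.1 else o) (dj.get? "upper") := by
  induction keys with
  | nil => intro dj; rfl
  | cons r keys ih =>
    intro dj
    simp only [List.foldl_cons]
    rw [ih]
    congr 1
    by_cases h1 : r.1 = j <;> by_cases h2 : r.2 = j <;>
      simp [h1, h2, PySem.Dict.get?_insert_self,
        PySem.Dict.get?_insert_of_ne _ _ (show ("upper" : String) ≠ "lower" by decide)]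

lemma pvAInner_lower (keys : List (String × String)) (j : String) :
    (pvAInner keys j).get? "lower"
      = keys.foldl (fun o r => if r.1 == j then some r.2 else o) none := by
  rw [pvAInner, ← PySem.List.foldl_if_eq_foldl_filter]
  have h := pvAInner_low_aux j keys PySem.Dict.empty
  rwa [PySem.Dict.get?_empty] at h

lemma pvAInner_upper (keys : List (String × String)) (j : String) :
    (pvAInner keys j).get? "upper"
      = keys.foldl (fun o r => if r.2 == j then some r.1 else o) none := by
  rw [pvAInner, ← PySem.List.foldl_if_eq_foldl_filter]
  have h := pvAInner_up_aux j keys PySem.Dict.empty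
  rwa [PySem.Dict.get?_empty] at h

lemma pvAPhase1_getD_aux (keys : List (String × String)) (dels : List String) (j : String) :
    ∀ d : PySem.Dict String (PySem.Dict String String),
    (dels.foldl (fun d1 j => d1.insert j (pvAInner keys j)) d).getD j PySem.Dict.empty
      = if j ∈ dels then pvAInner keys j else d.getD j PySem.Dict.empty := by
  induction dels with
  | nil => intro d; simp
  | cons k dels ih =>
    intro d
    simp only [List.foldl_cons]
    rw [ih]
    by_cases hk : j = k <;> by_cases hm : j ∈ dels <;>
      simp [hk, hm, PySem.Dict.getD_insert]

lemma pvAPhase1_getD (keys : List (String × String)) (dels : List String) (j : String)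
    (hj : j ∈ dels) :
    (pvAPhase1 keys dels).getD j PySem.Dict.empty = pvAInner keys j := by
  rw [pvAPhase1, pvAPhase1_getD_aux, if_pos hj]

lemma pvAPhase1_keys (keys : List (String × String)) (dels : List String) :
    (pvAPhase1 keys dels).keys = PySem.Set.ofList dels := by
  rw [pvAPhase1, PySem.Dict.keys_foldl_insert (f := fun _ j => pvAInner keys j),
    PySem.Dict.keys_empty, PySem.Set.update_nil_left]

-- B's one pass, split into its four independent folds
lemma pvBPass_aux (member : PySem.Set String) (keys : List (String × String)) :
    ∀ (a b : PySem.Dict String String) (c d : PySem.Dict String (List String)),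
    keys.foldl (fun st r =>
      (if PySem.Set.contains member r.1 then st.1.insert r.1 r.2 else st.1,
       if PySem.Set.contains member r.2 then st.2.1.insert r.2 r.1 else st.2.1,
       st.2.2.1.modify r.1 [] (fun l => l ++ [r.2]),
       st.2.2.2.modify r.2 [] (fun l => l ++ [r.1]))) (a, b, c, d) =
      (keys.foldl (fun d r => if PySem.Set.contains member r.1 then d.insert r.1 r.2 else d) a,
       keys.foldl (fun d r => if PySem.Set.contains member r.2 then d.insert r.2 r.1 else d) b,
       keys.foldl (fun d r => d.modify r.1 [] (fun l => l ++ [r.2])) c,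
       keys.foldl (fun d r => d.modify r.2 [] (fun l => l ++ [r.1])) d) := by
  induction keys with
  | nil => intro a b c d; rfl
  | cons r keys ih =>
    intro a b c d
    simp only [List.foldl_cons]
    exact ih _ _ _ _

lemma pvBPass_eq (member : PySem.Set String) (keys : List (String × String)) :
    pvBPass member keys =
      (keys.foldl (fun d r => if PySem.Set.contains member r.1 then d.insert r.1 r.2 else d) PySem.Dict.empty,
       keys.foldl (fun d r => if PySem.Set.contains member r.2 then d.insert r.2 r.1 else d) PySem.Dict.empty,
       keys.foldl (fun d r => d.modify r.1 [] (fun l => l ++ [r.2])) PySem.Dict.empty,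
       keys.foldl (fun d r => d.modify r.2 [] (fun l => l ++ [r.1])) PySem.Dict.empty) := by
  rw [pvBPass, pvBPass_aux]

lemma pvBLow_get? (member : PySem.Set String) (keys : List (String × String)) (j : String)
    (hj : PySem.Set.contains member j = true) :
    ∀ d : PySem.Dict String String,
    (keys.foldl (fun d r => if PySem.Set.contains member r.1 then d.insert r.1 r.2 else d) d).get? j
      = keys.foldl (fun o r => if r.1 == j then some r.2 else o) (d.get? j) := by
  induction keys with
  | nil => intro d; rfl
  | cons r keys ih =>
    intro d
    simp only [List.foldl_cons]
    rw [ih]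
    congr 1
    by_cases h1 : r.1 = j
    · subst h1
      simp [(PySem.Set.contains_iff member r.1).1 hj, PySem.Dict.get?_insert_self]
    · by_cases hc : r.1 ∈ member <;>
        simp [hc, h1, PySem.Dict.get?_insert_of_ne _ _ (fun h => h1 h.symm)]

lemma pvBUp_get? (member : PySem.Set String) (keys : List (String × String)) (j : String)
    (hj : PySem.Set.contains member j = true) :
    ∀ d : PySem.Dict String String,
    (keys.foldl (fun d r => if PySem.Set.contains member r.2 then d.insert r.2 r.1 else d) d).get? j
      = keys.foldl (fun o r => if r.2 == j then some r.1 else o) (d.get? j) := by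
  induction keys with
  | nil => intro d; rfl
  | cons r keys ih =>
    intro d
    simp only [List.foldl_cons]
    rw [ih]
    congr 1
    by_cases h1 : r.2 = j
    · subst h1
      simp [(PySem.Set.contains_iff member r.2).1 hj, PySem.Dict.get?_insert_self]
    · by_cases hc : r.2 ∈ member <;>
        simp [hc, h1, PySem.Dict.get?_insert_of_ne _ _ (fun h => h1 h.symm)]

lemma pvSucc_getD (keys : List (String × String)) (j : String) :
    (keys.foldl (fun d r => d.modify r.1 [] (fun l => l ++ [r.2])) PySem.Dict.empty).getD j []
      = (keys.filter (fun r => r.1 == j)).map (fun r => r.2) := by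
  rw [PySem.Dict.getD_foldl_modify_append]
  simp

lemma pvPred_getD (keys : List (String × String)) (j : String) :
    (keys.foldl (fun d r => d.modify r.2 [] (fun l => l ++ [r.1])) PySem.Dict.empty).getD j []
      = (keys.filter (fun r => r.2 == j)).map (fun r => r.1) := by
  have h : (keys.foldl (fun d r => d.modify r.2 [] (fun l => l ++ [r.1])) PySem.Dict.empty : PySem.Dict String (List String))
      = ((keys.map Prod.swap).foldl (fun d p => d.modify p.1 [] (fun l => l ++ [p.2])) PySem.Dict.empty) := by
    rw [List.foldl_map]; simp only [Prod.fst_swap, Prod.snd_swap]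
  rw [h, PySem.Dict.getD_foldl_modify_append]
  simp [List.filter_map, List.map_map, Function.comp_def]

-- one phase of the chaining pass, in lockstep over the full key list
lemma pvLoop2_inner_rel (D : List String) (j : String) (hj : j ∈ D) :
    ∀ (keys : List (String × String)) (d1 : PySem.Dict String (PySem.Dict String String))
      (low up : PySem.Dict String String), pvRel D d1 low up →
    pvRel D
      (keys.foldl (fun d1 r =>
        if r.1 == j || r.2 == j then
          (if r.1 == j then
            if D.contains r.2 then
              d1.modify j PySem.Dict.empty
                (fun d => d.insert "lower" ((d1.getD r.2 PySem.Dict.empty).getD "lower" ""))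
            else d1
          else d1)
        else d1) d1)
      (keys.foldl (fun low r =>
        if r.1 == j then
          (if PySem.Set.contains (PySem.Set.ofList D) r.2 then low.insert j (low.getD r.2 "") else low)
        else low) low)
      up := by
  intro keys
  induction keys with
  | nil => intro d1 low up h; exact h
  | cons r keys ih =>
    intro d1 low up h
    simp only [List.foldl_cons]
    by_cases h1 : r.1 = j
    · by_cases h2 : r.2 ∈ D
      · have hc : D.contains r.2 = true := List.contains_iff_mem.2 h2
        have hc2 : PySem.Set.contains (PySem.Set.ofList D) r.2 = true := by
          rw [Bool.eq_iff_iff]; simp [PySem.Set.mem_ofList, h2]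
        have hv : (d1.getD r.2 PySem.Dict.empty).getD "lower" "" = low.getD r.2 "" := by
          rw [PySem.Dict.getD_eq_get?_getD, (h.2 r.2 h2).1, ← PySem.Dict.getD_eq_get?_getD]
        simp only [h1, hc, hc2, BEq.rfl, Bool.true_or, if_true, hv]
        exact ih _ _ _ (pvRel_update_low D d1 low up j _ hj h)
      · have hc : D.contains r.2 = false := by
          rw [← Bool.not_eq_true, List.contains_iff_mem]; exact h2
        have hc2 : PySem.Set.contains (PySem.Set.ofList D) r.2 = false := by
          rw [← Bool.not_eq_true]; simp [PySem.Set.mem_ofList, h2]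
        simp only [h1, hc, hc2, BEq.rfl, Bool.true_or, if_true]
        exact ih _ _ _ h
    · have hb : (r.1 == j) = false := by simp [h1]
      simp only [hb, Bool.false_or, Bool.false_eq_true, if_false, ite_self]
      exact ih _ _ _ h
lemma pvLoop3_inner_rel (D : List String) (k : String) (hk : k ∈ D) :
    ∀ (keys : List (String × String)) (d1 : PySem.Dict String (PySem.Dict String String))
      (low up : PySem.Dict String String), pvRel D d1 low up →
    pvRel D
      (keys.foldl (fun d1 r =>
        if r.1 == k || r.2 == k then
          (if r.2 == k then
            if D.contains r.1 then
              d1.modify k PySem.Dict.empty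
                (fun d => d.insert "upper" ((d1.getD r.1 PySem.Dict.empty).getD "upper" ""))
            else d1
          else d1)
        else d1) d1)
      low
      (keys.foldl (fun up r =>
        if r.2 == k then
          (if PySem.Set.contains (PySem.Set.ofList D) r.1 then up.insert k (up.getD r.1 "") else up)
        else up) up) := by
  intro keys
  induction keys with
  | nil => intro d1 low up h; exact h
  | cons r keys ih =>
    intro d1 low up h
    simp only [List.foldl_cons]
    by_cases h1 : r.2 = k
    · by_cases h2 : r.1 ∈ D
      · have hc : D.contains r.1 = true := List.contains_iff_mem.2 h2
        have hc2 : PySem.Set.contains (PySem.Set.ofList D) r.1 = true := by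
          rw [Bool.eq_iff_iff]; simp [PySem.Set.mem_ofList, h2]
        have hv : (d1.getD r.1 PySem.Dict.empty).getD "upper" "" = up.getD r.1 "" := by
          rw [PySem.Dict.getD_eq_get?_getD, (h.2 r.1 h2).2, ← PySem.Dict.getD_eq_get?_getD]
        simp only [h1, hc, hc2, BEq.rfl, Bool.or_true, if_true, hv]
        exact ih _ _ _ (pvRel_update_up D d1 low up k _ hk h)
      · have hc : D.contains r.1 = false := by
          rw [← Bool.not_eq_true, List.contains_iff_mem]; exact h2
        have hc2 : PySem.Set.contains (PySem.Set.ofList D) r.1 = false := by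
          rw [← Bool.not_eq_true]; simp [PySem.Set.mem_ofList, h2]
        simp only [h1, hc, hc2, BEq.rfl, Bool.or_true, if_false, Bool.false_eq_true, ite_self]
        exact ih _ _ _ h
    · have hb : (r.2 == k) = false := by simp [h1]
      simp only [hb, Bool.or_false, Bool.false_eq_true, if_false, ite_self]
      exact ih _ _ _ h

lemma pvLoop2_rel (keys : List (String × String)) (D : List String) :
    ∀ (M : List String), (∀ x ∈ M, x ∈ D) →
    ∀ (d1 : PySem.Dict String (PySem.Dict String String)) (low up : PySem.Dict String String),
      pvRel D d1 low up →
    pvRel D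
      (M.foldl (fun d1 j =>
        (keys.filter (fun r => r.1 == j || r.2 == j)).foldl (fun d1 r =>
          if r.1 == j then
            if D.contains r.2 then
              d1.modify j PySem.Dict.empty
                (fun d => d.insert "lower" ((d1.getD r.2 PySem.Dict.empty).getD "lower" ""))
            else d1
          else d1) d1) d1)
      (M.foldl (fun low j =>
        ((keys.filter (fun r => r.1 == j)).map (fun r => r.2)).foldl (fun low b =>
          if PySem.Set.contains (PySem.Set.ofList D) b then low.insert j (low.getD b "") else low) low) low)
      up := by
  intro M
  induction M with
  | nil => intro _ d1 low up h; exact h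
  | cons j M ih =>
    intro hM d1 low up h
    simp only [List.foldl_cons]
    have hj : j ∈ D := hM j (List.mem_cons_self ..)
    refine ih (fun x hx => hM x (List.mem_cons_of_mem _ hx)) _ _ _ ?_
    have hinner := pvLoop2_inner_rel D j hj keys d1 low up h
    rw [← PySem.List.foldl_if_eq_foldl_filter, List.foldl_map,
      ← PySem.List.foldl_if_eq_foldl_filter]
    exact hinner

lemma pvLoop3_rel (keys : List (String × String)) (D : List String) :
    ∀ (M : List String), (∀ x ∈ M, x ∈ D) →
    ∀ (d1 : PySem.Dict String (PySem.Dict String String)) (low up : PySem.Dict String String),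
      pvRel D d1 low up →
    pvRel D
      (M.foldl (fun d1 k =>
        (keys.filter (fun r => r.1 == k || r.2 == k)).foldl (fun d1 r =>
          if r.2 == k then
            if D.contains r.1 then
              d1.modify k PySem.Dict.empty
                (fun d => d.insert "upper" ((d1.getD r.1 PySem.Dict.empty).getD "upper" ""))
            else d1
          else d1) d1) d1)
      low
      (M.foldl (fun up k =>
        ((keys.filter (fun r => r.2 == k)).map (fun r => r.1)).foldl (fun up a =>
          if PySem.Set.contains (PySem.Set.ofList D) a then up.insert k (up.getD a "") else up) up) up) := by
  intro M
  induction M with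
  | nil => intro _ d1 low up h; exact h
  | cons k M ih =>
    intro hM d1 low up h
    simp only [List.foldl_cons]
    have hk : k ∈ D := hM k (List.mem_cons_self ..)
    refine ih (fun x hx => hM x (List.mem_cons_of_mem _ hx)) _ _ _ ?_
    have hinner := pvLoop3_inner_rel D k hk keys d1 low up h
    rw [← PySem.List.foldl_if_eq_foldl_filter, List.foldl_map,
      ← PySem.List.foldl_if_eq_foldl_filter]
    exact hinner
lemma pvPhase1_rel (keys : List (String × String)) (D : List String) :
    pvRel D (pvAPhase1 keys D)
      (keys.foldl (fun d r => if PySem.Set.contains (PySem.Set.ofList D) r.1 then d.insert r.1 r.2 else d) PySem.Dict.empty)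
      (keys.foldl (fun d r => if PySem.Set.contains (PySem.Set.ofList D) r.2 then d.insert r.2 r.1 else d) PySem.Dict.empty) := by
  refine ⟨pvAPhase1_keys keys D, fun j hj => ?_⟩
  have hc : PySem.Set.contains (PySem.Set.ofList D) j = true := by
    rw [Bool.eq_iff_iff]; simp [PySem.Set.mem_ofList, hj]
  rw [pvAPhase1_getD _ _ _ hj]
  constructor
  · rw [pvAInner_lower, pvBLow_get? _ _ _ hc, PySem.Dict.get?_empty]
  · rw [pvAInner_upper, pvBUp_get? _ _ _ hc, PySem.Dict.get?_empty]

lemma pvContains_keys (D : List String) (d1 : PySem.Dict String (PySem.Dict String String))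
    (low up : PySem.Dict String String) (h : pvRel D d1 low up) (x : String) :
    d1.contains x = PySem.Set.contains (PySem.Set.ofList D) x := by
  rw [Bool.eq_iff_iff, PySem.Dict.contains_iff_mem_keys, h.1]
  exact ⟨fun hm => (PySem.Set.contains_iff _ _).2 hm, fun hcon => (PySem.Set.contains_iff _ _).1 hcon⟩

lemma pvCondUp_rel (D : List String) (d1 : PySem.Dict String (PySem.Dict String String))
    (low up : PySem.Dict String String) (x v : String) (h : pvRel D d1 low up) :
    pvRel D
      (if PySem.Set.contains (PySem.Set.ofList D) x then
        d1.modify x PySem.Dict.empty (fun d => d.insert "upper" v) else d1)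
      low
      (if PySem.Set.contains (PySem.Set.ofList D) x then up.insert x v else up) := by
  by_cases hx : PySem.Set.contains (PySem.Set.ofList D) x = true
  · rw [if_pos hx, if_pos hx]
    exact pvRel_update_up D d1 low up x v ((PySem.Set.mem_ofList D x).1 ((PySem.Set.contains_iff _ _).1 hx)) h
  · rw [if_neg hx, if_neg hx]; exact h

lemma pvCondLow_rel (D : List String) (d1 : PySem.Dict String (PySem.Dict String String))
    (low up : PySem.Dict String String) (x v : String) (h : pvRel D d1 low up) :
    pvRel D
      (if PySem.Set.contains (PySem.Set.ofList D) x then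
        d1.modify x PySem.Dict.empty (fun d => d.insert "lower" v) else d1)
      (if PySem.Set.contains (PySem.Set.ofList D) x then low.insert x v else low)
      up := by
  by_cases hx : PySem.Set.contains (PySem.Set.ofList D) x = true
  · rw [if_pos hx, if_pos hx]
    exact pvRel_update_low D d1 low up x v ((PySem.Set.mem_ofList D x).1 ((PySem.Set.contains_iff _ _).1 hx)) h
  · rw [if_neg hx, if_neg hx]; exact h

lemma pvFinal_eq (D : List String) (d1 : PySem.Dict String (PySem.Dict String String))
    (low up : PySem.Dict String String) (h : pvRel D d1 low up) :
    (d1.keys.filter (fun l =>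
        ((d1.getD l PySem.Dict.empty).getD "upper" "" != "end") &&
        ((d1.getD l PySem.Dict.empty).getD "lower" "" != "start"))).map
      (fun l => [(d1.getD l PySem.Dict.empty).getD "upper" "",
                 (d1.getD l PySem.Dict.empty).getD "lower" ""])
      = ((PySem.Set.ofList D).filter (fun l => (up.getD l "" != "end") && (low.getD l "" != "start"))).map
          (fun l => [up.getD l "", low.getD l ""]) := by
  have hup : ∀ l ∈ PySem.Set.ofList D, (d1.getD l PySem.Dict.empty).getD "upper" "" = up.getD l "" := by
    intro l hl
    rw [PySem.Dict.getD_eq_get?_getD, (h.2 l ((PySem.Set.mem_ofList D l).1 hl)).2,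
      ← PySem.Dict.getD_eq_get?_getD]
  have hlow : ∀ l ∈ PySem.Set.ofList D, (d1.getD l PySem.Dict.empty).getD "lower" "" = low.getD l "" := by
    intro l hl
    rw [PySem.Dict.getD_eq_get?_getD, (h.2 l ((PySem.Set.mem_ofList D l).1 hl)).1,
      ← PySem.Dict.getD_eq_get?_getD]
  rw [h.1, List.filter_congr (fun l hl => by rw [hup l hl, hlow l hl])]
  apply List.map_congr_left
  intro l hl
  have hl' := List.mem_of_mem_filter hl
  rw [hup l hl', hlow l hl']

theorem pv_main (phi_ref : List String) (del_phase : List String)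
    (phasedict : List (String × String × Int)) :
    del_empty_phases phi_ref del_phase phasedict
      = del_empty_phases_alt phi_ref del_phase phasedict := by
  simp only [del_empty_phases, del_empty_phases_alt, pvBPass_eq]
  rw [List.filter_congr (fun a _ => pvContains_ofList del_phase a)]
  simp only [pvALoop2, pvALoop3, pvBChainLow, pvBChainUp, pvSucc_getD, pvPred_getD,
    List.contains_reverse]
  set D := phi_ref.filter (fun i => del_phase.contains i) with hDdef
  set keys := pvKeysOf phasedict with hKdef
  set lastp := (PySem.List.pyGet? phi_ref (-1)).getD "" with hLdef
  set firstp := (PySem.List.pyGet? phi_ref 0).getD "" with hFdef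
  have h1 := pvPhase1_rel keys D
  rw [pvContains_keys D _ _ _ h1 lastp]
  have h2 := pvCondUp_rel D _ _ _ lastp "end" h1
  rw [pvContains_keys D _ _ _ h2 firstp]
  have h3 := pvCondLow_rel D _ _ _ firstp "start" h2
  have h4 := pvLoop2_rel keys D D (fun x hx => hx) _ _ _ h3
  have h5 := pvLoop3_rel keys D D.reverse (fun x hx => List.mem_reverse.1 hx) _ _ _ h4
  exact pvFinal_eq D _ _ _ h5

-- ===== VERDICT (by name: the statement is the Claim_ definition above) =====
theorem del_empty_phases_spec : Claim_equal_del_empty_phases := by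
  intro phi_ref del_phase phasedict _ _
  unfold Spec_del_empty_phases
  exact pv_main phi_ref del_phase phasedict
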